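-- pv_equiv track=rewrite | github.com/Barnabet/company_search | backend/services/api_transformer.py | _transform_employee_sizes
-- ===== SOURCE A (Python) =====
-- from typing import Dict, Any, List, Optional
--
-- EMPLOYEE_SIZE_MAPPING = {
--     "0 salarie": "0 employees",
--     "1 ou 2 salaries": "1 to 2 employees",
--     "3 a 5 salaries": "3 to 5 employees",
--     "6 a 9 salaries": "6 to 9 employees",
--     "10 a 19 salaries": "10 to 19 employees",
--     "20 a 49 salaries": "20 to 49 employees",
--     "50 a 99 salaries": "50 to 99 employees",
--     "100 a 199 salaries": "100 to 199 employees",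
--     "200 a 249 salaries": "200 to 249 employees",
--     "250 a 499 salaries": "250 to 499 employees",
--     "500 a 999 salaries": "500 to 999 employees",
--     "1 000 a 1 999 salaries": "1000 to 1999 employees",
--     "2 000 a 4 999 salaries": "2000 to 4999 employees",
--     "5 000 a 9 999 salaries": "5000 to 9999 employees",
--     "10 000 salaries et plus": "10000+ employees",
-- }
--
-- def _transform_employee_sizes(tranches: Optional[List[str]]) -> List[str]:
--     """
--     Transform internal employee size format to API format.
--
--     Args:
--         tranches: List of internal size labels like "10 a 19 salaries"
--
--     Returns:
--         List of API format labels like "10 to 19 employees"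
--     """
--     if not tranches:
--         return []
--
--     result = []
--     for tranche in tranches:
--         # Try exact match first
--         api_format = EMPLOYEE_SIZE_MAPPING.get(tranche)
--         if api_format:
--             result.append(api_format)
--         else:
--             # Try normalized matching (lowercase, no accents)
--             tranche_lower = tranche.lower().strip()
--             for internal, api in EMPLOYEE_SIZE_MAPPING.items():
--                 if internal.lower() == tranche_lower:
--                     result.append(api)
--                     break
--
--     return result
-- ===== SOURCE B (Python) =====
-- from typing import Dict, Any, List, Optional
--
-- EMPLOYEE_SIZE_MAPPING = {
--     "0 salarie": "0 employees",
--     "1 ou 2 salaries": "1 to 2 employees",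
--     "3 a 5 salaries": "3 to 5 employees",
--     "6 a 9 salaries": "6 to 9 employees",
--     "10 a 19 salaries": "10 to 19 employees",
--     "20 a 49 salaries": "20 to 49 employees",
--     "50 a 99 salaries": "50 to 99 employees",
--     "100 a 199 salaries": "100 to 199 employees",
--     "200 a 249 salaries": "200 to 249 employees",
--     "250 a 499 salaries": "250 to 499 employees",
--     "500 a 999 salaries": "500 to 999 employees",
--     "1 000 a 1 999 salaries": "1000 to 1999 employees",
--     "2 000 a 4 999 salaries": "2000 to 4999 employees",
--     "5 000 a 9 999 salaries": "5000 to 9999 employees",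
--     "10 000 salaries et plus": "10000+ employees",
-- }
--
-- # Normalized index built once: keys are already lowercase/stripped, so one
-- # normalized lookup subsumes A's exact-match path and its inner 15-item scan.
-- _NORMALIZED = {k.lower(): v for k, v in EMPLOYEE_SIZE_MAPPING.items()}
--
--
-- def _transform_employee_sizes(tranches: Optional[List[str]]) -> List[str]:
--     if not tranches:
--         return []
--     result = []
--     for tranche in tranches:
--         key = tranche.lower().strip()
--         if key in _NORMALIZED:
--             result.append(_NORMALIZED[key])
--     return result
-- ===== Notes on version B (the rewrite author's own statement) =====
-- stated objective: faster
-- what changed: Replaces A's two lookup paths (exact dict get, then an inner linear scan over all 15 mapping items comparing lowercased keys) with a normalized lookup dict precomputed once, so each tranche is resolved by a single dict lookup on its lowercased-stripped form.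
import Mathlib
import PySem

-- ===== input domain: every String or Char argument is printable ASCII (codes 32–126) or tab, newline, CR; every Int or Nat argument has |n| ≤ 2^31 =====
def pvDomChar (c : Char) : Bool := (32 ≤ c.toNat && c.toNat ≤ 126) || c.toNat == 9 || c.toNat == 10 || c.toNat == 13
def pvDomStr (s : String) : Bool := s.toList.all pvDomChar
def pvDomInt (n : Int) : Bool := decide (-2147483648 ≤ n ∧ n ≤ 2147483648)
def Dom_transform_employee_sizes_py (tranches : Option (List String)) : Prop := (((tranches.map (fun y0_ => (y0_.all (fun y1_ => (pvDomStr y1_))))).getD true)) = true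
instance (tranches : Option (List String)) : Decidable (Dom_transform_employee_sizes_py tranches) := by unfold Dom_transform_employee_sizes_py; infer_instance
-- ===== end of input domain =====

-- B replaces A's exact-get-then-inner-scan with a normalized lookup dict built once (simpler, one lookup per label).

-- ===== PORT A =====
-- module constant EMPLOYEE_SIZE_MAPPING (a dict literal), shared by both Pythons
def pvMapItems : List (String × String) := [
  ("0 salarie", "0 employees"),
  ("1 ou 2 salaries", "1 to 2 employees"),
  ("3 a 5 salaries", "3 to 5 employees"),
  ("6 a 9 salaries", "6 to 9 employees"),
  ("10 a 19 salaries", "10 to 19 employees"),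
  ("20 a 49 salaries", "20 to 49 employees"),
  ("50 a 99 salaries", "50 to 99 employees"),
  ("100 a 199 salaries", "100 to 199 employees"),
  ("200 a 249 salaries", "200 to 249 employees"),
  ("250 a 499 salaries", "250 to 499 employees"),
  ("500 a 999 salaries", "500 to 999 employees"),
  ("1 000 a 1 999 salaries", "1000 to 1999 employees"),
  ("2 000 a 4 999 salaries", "2000 to 4999 employees"),
  ("5 000 a 9 999 salaries", "5000 to 9999 employees"),
  ("10 000 salaries et plus", "10000+ employees")]

def employeeSizeMapping : PySem.Dict String String := PySem.Dict.ofList pvMapItems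

def transform_employee_sizes_py (tranches : Option (List String)) : List String :=
  match tranches with
  | none => []
  | some ts =>
    if ts = [] then []
    else
      ts.foldl (fun result tranche =>
        -- api_format = EMPLOYEE_SIZE_MAPPING.get(tranche); if api_format: append
        match employeeSizeMapping.get? tranche with
        | some api =>
            if api = "" then
              -- falsy string: fall through to the normalized inner scan
              match employeeSizeMapping.items.find?
                  (fun p => PySem.Str.lower p.1 == PySem.Str.strip (PySem.Str.lower tranche)) with
              | some p => result ++ [p.2]
              | none => result
            else result ++ [api]
        | none =>
            -- inner for-loop with break = first item whose lowered key equals tranche_lower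
            match employeeSizeMapping.items.find?
                (fun p => PySem.Str.lower p.1 == PySem.Str.strip (PySem.Str.lower tranche)) with
            | some p => result ++ [p.2]
            | none => result) []

-- ===== PORT B =====
-- _NORMALIZED = {k.lower(): v for k, v in EMPLOYEE_SIZE_MAPPING.items()}
def normalizedMapping : PySem.Dict String String :=
  (PySem.Dict.ofList pvMapItems).items.foldl
    (fun d p => d.insert (PySem.Str.lower p.1) p.2) PySem.Dict.empty

def transform_employee_sizes_py_alt (tranches : Option (List String)) : List String :=
  match tranches with
  | none => []
  | some ts =>
    if ts = [] then []
    else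
      ts.foldl (fun result tranche =>
        match normalizedMapping.get? (PySem.Str.strip (PySem.Str.lower tranche)) with
        | some v => result ++ [v]
        | none => result) []

-- ===== PRECONDITION & SPEC =====
def Spec_transform_employee_sizes_py (tranches : Option (List String)) (out : List String) : Prop := out = transform_employee_sizes_py_alt tranches
instance (tranches : Option (List String)) (out : List String) : Decidable (Spec_transform_employee_sizes_py tranches out) := by unfold Spec_transform_employee_sizes_py; infer_instance

-- ===== CLAIM (what is proved, stated in full; the proofs are below) =====
def Claim_equal_transform_employee_sizes_py : Prop := ∀ (tranches : Option (List String)), Dom_transform_employee_sizes_py tranches → Spec_transform_employee_sizes_py tranches (transform_employee_sizes_py tranches)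

-- ===== LEMMAS AND PROOFS =====

-- every mapping key is already lowercase and stripped, and every value is truthy
theorem pvMapItems_norm : ∀ p ∈ pvMapItems,
    PySem.Str.lower p.1 = p.1 ∧ PySem.Str.strip p.1 = p.1 ∧ p.2 ≠ "" := by decide

theorem employeeSizeMapping_eq : employeeSizeMapping = PySem.Dict.mk pvMapItems := by decide

theorem normalizedMapping_eq : normalizedMapping = PySem.Dict.mk pvMapItems := by decide

theorem items_eq : employeeSizeMapping.items = pvMapItems := by decide

-- a successful literal-dict lookup means the key occurs in the list
-- a successful literal-dict lookup means the key occurs in the list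
theorem get?_mk_mem (L : List (String × String)) (t : String) (api : String)
    (h : (PySem.Dict.mk L).get? t = some api) : ∃ p ∈ L, p.1 = t := by
  induction L with
  | nil => simp [PySem.Dict.get?] at h
  | cons hd rest ih =>
    rw [PySem.Dict.get?_mk_cons] at h
    by_cases hk : hd.1 == t
    · exact ⟨hd, List.mem_cons_self, by simpa using hk⟩
    · simp [hk] at h
      obtain ⟨p, hp, hpt⟩ := ih h
      exact ⟨p, List.mem_cons_of_mem _ hp, hpt⟩

theorem opt_eq (L : List (String × String)) (t : String)
    (h : ∀ p ∈ L, PySem.Str.lower p.1 = p.1 ∧ PySem.Str.strip p.1 = p.1 ∧ p.2 ≠ "") :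
    (match (PySem.Dict.mk L).get? t with
     | some api =>
        if api = "" then (L.find? (fun p => PySem.Str.lower p.1 == PySem.Str.strip (PySem.Str.lower t))).map Prod.snd
        else some api
     | none => (L.find? (fun p => PySem.Str.lower p.1 == PySem.Str.strip (PySem.Str.lower t))).map Prod.snd)
    = (PySem.Dict.mk L).get? (PySem.Str.strip (PySem.Str.lower t)) := by
  induction L with
  | nil => simp [PySem.Dict.get?]
  | cons hd rest ih =>
    obtain ⟨k, v⟩ := hd
    obtain ⟨hkl, hks, hv⟩ := h _ List.mem_cons_self
    dsimp only at hkl hks hv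
    have hrest : ∀ p ∈ rest, PySem.Str.lower p.1 = p.1 ∧ PySem.Str.strip p.1 = p.1 ∧ p.2 ≠ "" :=
      fun p hp => h p (List.mem_cons_of_mem _ hp)
    rw [PySem.Dict.get?_mk_cons, PySem.Dict.get?_mk_cons]
    by_cases hkt : k = t
    · subst hkt
      have hnorm : PySem.Str.strip (PySem.Str.lower k) = k := by rw [hkl, hks]
      rw [hnorm, if_pos (beq_self_eq_true k)]
      exact if_neg hv
    · have hkt' : ¬ ((k == t) = true) := by simp [hkt]
      rw [if_neg hkt']
      by_cases hkey : PySem.Str.lower k = PySem.Str.strip (PySem.Str.lower t)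
      · have hkk : k = PySem.Str.strip (PySem.Str.lower t) := by rw [← hkl, hkey]
        have hnone : (PySem.Dict.mk rest).get? t = none := by
          cases hg : (PySem.Dict.mk rest).get? t with
          | none => rfl
          | some api =>
            obtain ⟨p, hp, hpt⟩ := get?_mk_mem rest t api hg
            obtain ⟨hpl, hps, _⟩ := hrest p hp
            have : PySem.Str.strip (PySem.Str.lower t) = t := by
              rw [← hpt, hpl, hps]
            exact absurd (hkk.trans this) hkt
        have hkeyb : (PySem.Str.lower k == PySem.Str.strip (PySem.Str.lower t)) = true := by
          simpa using hkey
        rw [hnone, if_pos (show (k == PySem.Str.strip (PySem.Str.lower t)) = true by simpa using hkk)]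
        simp only [List.find?_cons, hkeyb]
        rfl
      · have hkeyb : (PySem.Str.lower k == PySem.Str.strip (PySem.Str.lower t)) = false := by
          simpa using hkey
        have hkk' : ¬ ((k == PySem.Str.strip (PySem.Str.lower t)) = true) := by
          rw [← hkl]; simpa using hkey
        rw [if_neg hkk']
        simp only [List.find?_cons, hkeyb]
        exact ih hrest

-- the two per-element step functions of the folds agree
theorem step_eq :
    (fun (result : List String) (tranche : String) =>
      match employeeSizeMapping.get? tranche with
      | some api =>
          if api = "" then
            match employeeSizeMapping.items.find?
                (fun p => PySem.Str.lower p.1 == PySem.Str.strip (PySem.Str.lower tranche)) with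
            | some p => result ++ [p.2]
            | none => result
          else result ++ [api]
      | none =>
          match employeeSizeMapping.items.find?
              (fun p => PySem.Str.lower p.1 == PySem.Str.strip (PySem.Str.lower tranche)) with
          | some p => result ++ [p.2]
          | none => result)
    = (fun (result : List String) (tranche : String) =>
      match normalizedMapping.get? (PySem.Str.strip (PySem.Str.lower tranche)) with
      | some v => result ++ [v]
      | none => result) := by
  funext result tranche
  have h := opt_eq pvMapItems tranche pvMapItems_norm
  rw [items_eq, employeeSizeMapping_eq, normalizedMapping_eq, ← h]
  cases hg : (PySem.Dict.mk pvMapItems).get? tranche with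
  | some api =>
    simp only []
    by_cases hapi : api = ""
    · rw [if_pos hapi, if_pos hapi]
      cases (pvMapItems.find? (fun p => PySem.Str.lower p.1 == PySem.Str.strip (PySem.Str.lower tranche))) <;> rfl
    · rw [if_neg hapi, if_neg hapi]
  | none =>
    simp only []
    cases (pvMapItems.find? (fun p => PySem.Str.lower p.1 == PySem.Str.strip (PySem.Str.lower tranche))) <;> rfl

-- ===== VERDICT (by name: the statement is the Claim_ definition above) =====
theorem transform_employee_sizes_py_spec : Claim_equal_transform_employee_sizes_py := by
  intro tranches _
  unfold Spec_transform_employee_sizes_py transform_employee_sizes_py transform_employee_sizes_py_alt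
  cases tranches with
  | none => rfl
  | some ts =>
    by_cases h : ts = []
    · simp [h]
    · simp only [h, if_false]
      rw [step_eq]
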